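-- pv_equiv track=rewrite | github.com/adpena/molt | src/molt/stdlib/curses/ascii.py | unctrl
-- ===== SOURCE A (Python) =====
-- SP = 0x20
--
-- DEL = 0x7F
--
-- controlnames = [
--     "^@",
--     "^A",
--     "^B",
--     "^C",
--     "^D",
--     "^E",
--     "^F",
--     "^G",
--     "^H",
--     "^I",
--     "^J",
--     "^K",
--     "^L",
--     "^M",
--     "^N",
--     "^O",
--     "^P",
--     "^Q",
--     "^R",
--     "^S",
--     "^T",
--     "^U",
--     "^V",
--     "^W",
--     "^X",
--     "^Y",
--     "^Z",
--     "^[",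
--     "^\\",
--     "^]",
--     "^^",
--     "^_",
--     " ",
-- ]
--
-- def _ctoi(c) -> int:
--     if isinstance(c, str):
--         if not c:
--             return 0
--         return ord(c[0])
--     return int(c)
--
-- def isascii(c) -> bool:
--     return 0 <= _ctoi(c) <= 0x7F
--
-- def isprint(c) -> bool:
--     v = _ctoi(c)
--     return SP <= v < DEL
--
-- def unctrl(c) -> str:
--     v = _ctoi(c)
--     if isascii(v):
--         if isprint(v):
--             return chr(v)
--         if v == DEL:
--             return "^?"
--         return controlnames[v]
--     return f"!{unctrl(v & 0x7F)}"
-- ===== SOURCE B (Python) =====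
-- # Full precomputed 128-entry representation table, built by one uniform XOR
-- # rule ("^" + chr(b ^ 0x40) flips control bytes AND DEL into their caret
-- # partner); unctrl itself is a single branch-free lookup plus a bang prefix.
-- _REPR = ["^" + chr(b ^ 0x40) if b < 0x20 or b == 0x7F else chr(b) for b in range(0x80)]
--
-- def unctrl(c) -> str:
--     v = int(c)
--     return "!" * (not 0 <= v < 0x80) + _REPR[v & 0x7F]
-- ===== Notes on version B (the rewrite author's own statement) =====
-- stated objective: simpler
-- what changed: Replaced A's branch chain (isprint test, DEL special case, partial controlnames table, recursion for non-ascii) with one full representation table over all seven-bit bytes, precomputed by a uniform XOR rule ('^'+chr(b^0x40) maps control bytes and DEL alike), so unctrl is a single branch-free masked table lookup plus a bang prefix.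
import Mathlib
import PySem

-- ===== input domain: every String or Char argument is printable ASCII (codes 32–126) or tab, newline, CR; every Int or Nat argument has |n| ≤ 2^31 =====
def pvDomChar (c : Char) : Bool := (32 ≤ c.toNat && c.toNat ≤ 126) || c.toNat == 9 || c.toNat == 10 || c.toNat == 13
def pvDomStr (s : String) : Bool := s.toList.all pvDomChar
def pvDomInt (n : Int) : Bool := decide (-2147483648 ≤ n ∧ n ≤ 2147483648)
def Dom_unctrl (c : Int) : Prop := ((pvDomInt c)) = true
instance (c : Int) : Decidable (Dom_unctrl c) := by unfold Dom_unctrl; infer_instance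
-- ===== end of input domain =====

set_option maxRecDepth 4096


-- B replaces A's branch chain, partial controlnames table and recursion by one full
-- 128-entry table built with a uniform XOR rule and a single masked lookup; objective: simpler.

-- ===== PORT A =====
def controlnames : List String :=
  ["^@", "^A", "^B", "^C", "^D", "^E", "^F", "^G", "^H", "^I", "^J", "^K",
   "^L", "^M", "^N", "^O", "^P", "^Q", "^R", "^S", "^T", "^U", "^V", "^W",
   "^X", "^Y", "^Z", "^[", "^\\", "^]", "^^", "^_", " "]

-- _ctoi on an int argument is int(c) = c
def ctoi (c : Int) : Int := c

def pyIsascii (c : Int) : Bool := decide (0 ≤ ctoi c ∧ ctoi c ≤ 127)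

def pyIsprint (c : Int) : Bool := decide (32 ≤ ctoi c ∧ ctoi c < 127)

-- v & 0x7F always lands in [0, 127] (needed for the recursion's termination)
theorem band127_range (c : Int) :
    0 ≤ PySem.Int.band c 127 ∧ PySem.Int.band c 127 ≤ 127 := by
  unfold PySem.Int.band
  split_ifs with h1 h2
  · refine ⟨Int.natCast_nonneg _, ?_⟩
    have := Nat.and_le_right (n := c.toNat) (m := (127 : Int).toNat)
    omega
  · omega
  · refine ⟨Int.natCast_nonneg _, ?_⟩
    have : (127 : Int).toNat - ((127 : Int).toNat &&& (-c - 1).toNat) ≤ 127 := by omega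
    omega
  · omega

def unctrl (c : Int) : String :=
  let v := ctoi c
  if pyIsascii v then
    if pyIsprint v then (Char.ofNat v.toNat).toString
    else if v = 127 then "^?"
    else (PySem.List.pyGet? controlnames v).getD ""
  else "!" ++ unctrl (PySem.Int.band v 127)
termination_by (if pyIsascii c then 0 else 1)
decreasing_by
  have hb := band127_range c
  simp only [pyIsascii, ctoi, decide_eq_true_eq] at *
  rw [if_pos hb, if_neg (by assumption)]
  omega

-- ===== PORT B =====
-- the precomputed table: for each byte, '^' + chr(b ^ 0x40) if control or DEL, else chr(b)
def unctrlRepr : List String :=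
  (List.range 128).map (fun b =>
    if b < 32 ∨ b = 127 then "^" ++ (Char.ofNat (b ^^^ 64)).toString
    else (Char.ofNat b).toString)

def unctrl_alt (c : Int) : String :=
  let v := c
  (if 0 ≤ v ∧ v < 128 then "" else "!") ++
    (PySem.List.pyGet? unctrlRepr (PySem.Int.band v 127)).getD ""

-- ===== PRECONDITION & SPEC =====
def Spec_unctrl (c : Int) (out : String) : Prop := out = unctrl_alt c
instance (c : Int) (out : String) : Decidable (Spec_unctrl c out) := by unfold Spec_unctrl; infer_instance

-- ===== CLAIM (what is proved, stated in full; the proofs are below) =====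
def Claim_equal_unctrl : Prop := ∀ (c : Int), Dom_unctrl c → Spec_unctrl c (unctrl c)

-- ===== LEMMAS AND PROOFS =====

-- masking an already-masked value is the identity on [0, 127]
theorem band127_idem (w : Int) (h0 : 0 ≤ w) (h1 : w ≤ 127) :
    PySem.Int.band w 127 = w := by
  interval_cases w <;> decide

-- on ascii inputs A's answer equals B's table lookup
theorem base_eq (w : Int) (h0 : 0 ≤ w) (h1 : w ≤ 127) :
    unctrl w = unctrl_alt w := by
  rw [unctrl]
  interval_cases w <;> decide

-- ===== VERDICT (by name: the statement is the Claim_ definition above) =====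
theorem unctrl_spec : Claim_equal_unctrl := by
  intro c _
  unfold Spec_unctrl
  by_cases h : 0 ≤ c ∧ c ≤ 127
  · exact base_eq c h.1 h.2
  · have hb := band127_range c
    have hstep : unctrl c = "!" ++ unctrl (PySem.Int.band c 127) := by
      rw [unctrl]
      simp [ctoi, pyIsascii, h]
    have hbase := base_eq _ hb.1 hb.2
    rw [hstep, hbase]
    unfold unctrl_alt
    simp only [band127_idem _ hb.1 hb.2]
    have h128 : ¬ (0 ≤ c ∧ c < 128) := by omega
    have hb128 : 0 ≤ PySem.Int.band c 127 ∧ PySem.Int.band c 127 < 128 := by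
      exact ⟨hb.1, by omega⟩
    simp [h128, hb128]
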